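-- pv_equiv track=rewrite | github.com/xoxoqkr/ASP | ValueRevise.py | Comapre2List
-- ===== SOURCE A (Python) =====
-- import operator
--
-- def Comapre2List(base, compare, ox_table):
--     #base에는 있으나, compare는 없는 요소 찾기.
--     base.sort(key=operator.itemgetter(0))
--     compare.sort(key=operator.itemgetter(0))
--     expectation = []
--     actual = []
--     for info1 in base:
--         ox_table[0] += 1
--         for info2 in compare:
--             if info1[0] == info2[0]:
--                 if info1[1] == info2[1]:
--                     ox_table[1] += 1
--                     ox_table[3] += 1
--                     pass
--                 else:
--                     expectation.append(info1)
--                     actual.append(info2)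
--                 break
--     ox_table[2] += len(compare)
--     return expectation, actual
-- ===== SOURCE B (Python) =====
-- import operator
--
-- def Comapre2List(base, compare, ox_table):
--     # Two-pointer merge over the two key-sorted lists instead of a nested scan.
--     # Same in-place sorts and ox_table mutations as the original.
--     base.sort(key=operator.itemgetter(0))
--     compare.sort(key=operator.itemgetter(0))
--     expectation = []
--     actual = []
--     j = 0
--     n = len(compare)
--     for b in base:
--         ox_table[0] += 1
--         while j < n and compare[j][0] < b[0]:
--             j += 1
--         if j < n and compare[j][0] == b[0]:
--             c = compare[j]          # first occurrence of this key; not consumed,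
--             if b[1] == c[1]:        # so duplicate base keys reuse it, like A's break
--                 ox_table[1] += 1
--                 ox_table[3] += 1
--             else:
--                 expectation.append(b)
--                 actual.append(c)
--     ox_table[2] += len(compare)
--     return expectation, actual
-- ===== Notes on version B (the rewrite author's own statement) =====
-- stated objective: alternative
-- what changed: Replaces the nested scan of compare for every base element by a single two-pointer merge over the two key-sorted lists (the pointer is not advanced on key equality, so duplicate base keys reuse the first matching compare element exactly like A's break).
import Mathlib
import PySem

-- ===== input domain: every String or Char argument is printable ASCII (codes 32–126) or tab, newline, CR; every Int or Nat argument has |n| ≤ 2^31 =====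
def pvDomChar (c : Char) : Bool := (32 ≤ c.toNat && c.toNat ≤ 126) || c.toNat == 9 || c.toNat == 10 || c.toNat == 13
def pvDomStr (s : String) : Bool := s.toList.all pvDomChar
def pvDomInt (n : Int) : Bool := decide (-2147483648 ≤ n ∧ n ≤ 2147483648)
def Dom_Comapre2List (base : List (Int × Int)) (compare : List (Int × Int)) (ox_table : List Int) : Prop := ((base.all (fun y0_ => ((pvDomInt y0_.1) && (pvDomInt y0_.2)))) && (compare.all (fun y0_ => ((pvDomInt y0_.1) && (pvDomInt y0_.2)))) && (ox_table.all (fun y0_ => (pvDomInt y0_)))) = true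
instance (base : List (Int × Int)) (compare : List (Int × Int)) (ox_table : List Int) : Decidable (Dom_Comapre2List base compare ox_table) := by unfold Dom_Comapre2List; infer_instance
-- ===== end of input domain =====

-- B replaces A's nested scan by a two-pointer merge over the two key-sorted lists (alternative algorithm).
-- A (and B) sort base/compare in place and increment ox_table cells; the equivalence proved
-- here is about the RETURN value (expectation, actual) only — B performs the same mutations.

-- ===== PORT A =====
-- one step of A's outer loop: the inner 'for info2 in compare: … break' is the first
-- element of compare whose key equals info1's key (find?); ox_table writes are side
-- effects not reflected in the return value.
def pvAStep (compare : List (Int × Int)) (st : (List (Int × Int)) × (List (Int × Int)))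
    (info1 : Int × Int) : (List (Int × Int)) × (List (Int × Int)) :=
  match compare.find? (fun info2 => info1.1 == info2.1) with
  | some info2 =>
      if info1.2 == info2.2 then st
      else (st.1 ++ [info1], st.2 ++ [info2])
  | none => st

def Comapre2List (base : List (Int × Int)) (compare : List (Int × Int)) (ox_table : List Int) : (List (Int × Int)) × (List (Int × Int)) :=
  let base1 := PySem.List.sorted base (fun p => p.1) false
  let compare1 := PySem.List.sorted compare (fun p => p.1) false
  base1.foldl (pvAStep compare1) ([], [])

-- ===== PORT B =====
-- Source B's while-advance of j over the sorted compare list = dropWhile on the remaining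
-- suffix; the matched element is not consumed, so duplicate base keys reuse it.
def pvTwoPtr : List (Int × Int) → List (Int × Int) → (List (Int × Int)) × (List (Int × Int))
  | [], _ => ([], [])
  | b :: rest, cs =>
    let cs' := cs.dropWhile (fun c => decide (c.1 < b.1))
    match cs' with
    | [] => pvTwoPtr rest []
    | c :: _ =>
      let t := pvTwoPtr rest cs'
      if c.1 = b.1 then
        if b.2 = c.2 then t else (b :: t.1, c :: t.2)
      else t

def Comapre2List_alt (base : List (Int × Int)) (compare : List (Int × Int)) (ox_table : List Int) : (List (Int × Int)) × (List (Int × Int)) :=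
  let base1 := PySem.List.sorted base (fun p => p.1) false
  let compare1 := PySem.List.sorted compare (fun p => p.1) false
  pvTwoPtr base1 compare1

-- ===== PRECONDITION & SPEC =====
-- A raises IndexError iff ox_table has fewer than 3 cells (ox_table[2] is always written),
-- or fewer than 4 while some base element's first key-matching compare element also has an
-- equal second component (then ox_table[3] is written); Pre_ excludes exactly those inputs.
def Pre_Comapre2List (base : List (Int × Int)) (compare : List (Int × Int)) (ox_table : List Int) : Prop :=
  3 ≤ ox_table.length ∧
  ((base.any fun b => (compare.find? (fun c => c.1 == b.1)).any (fun c => c.2 == b.2)) = true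
    → 4 ≤ ox_table.length)
instance (base : List (Int × Int)) (compare : List (Int × Int)) (ox_table : List Int) : Decidable (Pre_Comapre2List base compare ox_table) := by unfold Pre_Comapre2List; infer_instance

def pvWitness_Comapre2List : (List (Int × Int)) × (List (Int × Int)) × List Int :=
  ([(1, 2), (3, 4)], [(1, 5), (3, 4)], [0, 0, 0, 0])

def Spec_Comapre2List (base : List (Int × Int)) (compare : List (Int × Int)) (ox_table : List Int) (out : (List (Int × Int)) × (List (Int × Int))) : Prop := out = Comapre2List_alt base compare ox_table
instance (base : List (Int × Int)) (compare : List (Int × Int)) (ox_table : List Int) (out : (List (Int × Int)) × (List (Int × Int))) : Decidable (Spec_Comapre2List base compare ox_table out) := by unfold Spec_Comapre2List; infer_instance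

-- ===== CLAIM (what is proved, stated in full; the proofs are below) =====
def Claim_equal_Comapre2List : Prop := ∀ (base : List (Int × Int)) (compare : List (Int × Int)) (ox_table : List Int), Dom_Comapre2List base compare ox_table → Pre_Comapre2List base compare ox_table → Spec_Comapre2List base compare ox_table (Comapre2List base compare ox_table)

-- ===== LEMMAS AND PROOFS =====

-- A's fold commutes with the accumulator: starting from (e, a) just prepends e, a.
theorem pvScan_acc (cs : List (Int × Int)) (bs : List (Int × Int))
    (e a : List (Int × Int)) :
    bs.foldl (pvAStep cs) (e, a)
      = (e ++ (bs.foldl (pvAStep cs) ([], [])).1, a ++ (bs.foldl (pvAStep cs) ([], [])).2) := by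
  induction bs generalizing e a with
  | nil => simp
  | cons b bs ih =>
    simp only [List.foldl_cons]
    rcases h : cs.find? (fun info2 => b.1 == info2.1) with _ | c
    · simp only [pvAStep, h]; exact ih e a
    · by_cases h2 : b.2 = c.2
      · have hb2 : (b.2 == c.2) = true := by simp [h2]
        simp only [pvAStep, h, hb2, if_pos]
        exact ih e a
      · have hb2 : (b.2 == c.2) = false := by simp [h2]
        simp only [pvAStep, h, hb2, Bool.false_eq_true, if_false, List.nil_append]
        rw [ih (e ++ [b]) (a ++ [c]), ih [b] [c]]
        simp

-- dropWhile head does not satisfy the predicate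
theorem pvDropWhile_head {α : Type} (p : α → Bool) (l : List α) (c : α) (cs : List α)
    (h : l.dropWhile p = c :: cs) : p c = false := by
  induction l with
  | nil => simp at h
  | cons x xs ih =>
    by_cases hx : p x
    · rw [List.dropWhile_cons_of_pos hx] at h; exact ih h
    · rw [List.dropWhile_cons_of_neg hx] at h
      cases h; simpa using hx

-- Core: A's scan over pre ++ suf equals B's two-pointer on suf, as long as every
-- element of pre has key strictly below every key in bs.
theorem pvMain (bs : List (Int × Int)) :
    ∀ (pre suf : List (Int × Int)),
    bs.Pairwise (fun x y => x.1 ≤ y.1) →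
    (pre ++ suf).Pairwise (fun x y => x.1 ≤ y.1) →
    (∀ p ∈ pre, ∀ b ∈ bs, p.1 < b.1) →
    bs.foldl (pvAStep (pre ++ suf)) ([], []) = pvTwoPtr bs suf := by
  induction bs with
  | nil => intro pre suf _ _ _; simp [pvTwoPtr]
  | cons b rest ih =>
    intro pre suf hbs hps hlt
    have hbrest : ∀ b' ∈ rest, b.1 ≤ b'.1 := by
      intro b' hb'; exact (List.pairwise_cons.mp hbs).1 b' hb'
    have hrest : rest.Pairwise (fun x y => x.1 ≤ y.1) := (List.pairwise_cons.mp hbs).2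
    have hsuf : suf.Pairwise (fun x y => x.1 ≤ y.1) := (List.pairwise_append.mp hps).2.1
    -- pre elements never match b's key
    have hfind_pre : (pre ++ suf).find? (fun c => b.1 == c.1) = suf.find? (fun c => b.1 == c.1) := by
      rw [List.find?_append]
      have : pre.find? (fun c => b.1 == c.1) = none := by
        rw [List.find?_eq_none]
        intro x hx
        have := hlt x hx b (by simp)
        simp; omega
      simp [this]
    set t := suf.takeWhile (fun c => decide (c.1 < b.1)) with ht
    set d := suf.dropWhile (fun c => decide (c.1 < b.1)) with hd
    have htd : t ++ d = suf := List.takeWhile_append_dropWhile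
    have ht_lt : ∀ x ∈ t, x.1 < b.1 := by
      intro x hx
      have := List.mem_takeWhile_imp hx
      simpa using this
    have hfind_t : suf.find? (fun c => b.1 == c.1) = d.find? (fun c => b.1 == c.1) := by
      rw [← htd, List.find?_append]
      have : t.find? (fun c => b.1 == c.1) = none := by
        rw [List.find?_eq_none]
        intro x hx
        have := ht_lt x hx
        simp; omega
      simp [this]
    have hd_pairwise : d.Pairwise (fun x y => x.1 ≤ y.1) :=
      hsuf.sublist (List.dropWhile_sublist _)
    -- new pre for the tail: pre ++ t; its elements are < every key of rest
    have hlt' : ∀ p ∈ pre ++ t, ∀ b' ∈ rest, p.1 < b'.1 := by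
      intro p hp b' hb'
      have hb2 := hbrest b' hb'
      rcases List.mem_append.mp hp with h | h
      · have := hlt p h b (by simp); omega
      · have := ht_lt p h; omega
    have hps' : (pre ++ t ++ d).Pairwise (fun x y => x.1 ≤ y.1) := by
      rw [List.append_assoc, htd]; exact hps
    simp only [List.foldl_cons, pvTwoPtr]
    rcases hdeq : d with _ | ⟨c, ds⟩
    · -- no remaining candidate: find? = none, B passes the empty suffix on
      have hfind : (pre ++ suf).find? (fun c => b.1 == c.1) = none := by
        rw [hfind_pre, hfind_t, hdeq]; rfl
      rw [hfind_t] at hfind_pre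
      simp only [pvAStep, hfind_pre, hdeq, List.find?_nil]
      have := ih (pre ++ suf) [] (by simpa using hrest) (by simpa using hps)
        (by intro p hp b' hb';
            rcases List.mem_append.mp hp with h | h
            · have := hlt p h b (by simp); have := hbrest b' hb'; omega
            · rw [← htd, hdeq] at h; simp at h
              have := ht_lt p h; have := hbrest b' hb'; omega)
      simpa [← hd, hdeq] using this
    · have hc_not_lt : ¬ (c.1 < b.1) := by
        have := pvDropWhile_head _ suf c ds (by rw [← hd, hdeq])
        simpa using this
      have hih : rest.foldl (pvAStep (pre ++ suf)) ([], []) = pvTwoPtr rest (c :: ds) := by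
        have := ih (pre ++ t) d hrest hps' hlt'
        rw [List.append_assoc, htd] at this
        rw [this, hdeq]
      by_cases hkey : c.1 = b.1
      · -- key matches: A's find? returns c (first occurrence)
        have hfind : (pre ++ suf).find? (fun x => b.1 == x.1) = some c := by
          rw [hfind_pre, hfind_t, hdeq, List.find?_cons_of_pos]
          simp [hkey]
        by_cases hval : b.2 = c.2
        · have hstep : pvAStep (pre ++ suf) ([], []) b = ([], []) := by
            simp [pvAStep, hfind, hval]
          simp only [← hd, hdeq, hstep, if_pos hkey, if_pos hval]
          exact hih
        · have hstep : pvAStep (pre ++ suf) ([], []) b = ([b], [c]) := by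
            simp [pvAStep, hfind, hval]
          simp only [← hd, hdeq, hstep, if_pos hkey, if_neg hval]
          rw [pvScan_acc, hih]
          simp
      · -- head key must be > b.1, and so are all later keys: no match at all
        have hc_gt : b.1 < c.1 := by omega
        have hfind : (pre ++ suf).find? (fun x => b.1 == x.1) = none := by
          rw [hfind_pre, hfind_t, hdeq, List.find?_eq_none]
          intro x hx
          rcases List.mem_cons.mp hx with h | h
          · subst h; simp; omega
          · have : c.1 ≤ x.1 := by
              have := hd_pairwise
              rw [hdeq, List.pairwise_cons] at this
              exact this.1 x h
            simp; omega
        have hstep : pvAStep (pre ++ suf) ([], []) b = ([], []) := by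
          simp [pvAStep, hfind]
        simp only [← hd, hdeq, hstep, if_neg hkey]
        exact hih

-- ===== VERDICT (by name: the statement is the Claim_ definition above) =====
theorem Comapre2List_spec : Claim_equal_Comapre2List := by
  intro base compare ox_table _ _
  unfold Spec_Comapre2List Comapre2List Comapre2List_alt
  exact pvMain _ [] _ (by simpa using PySem.List.sorted_pairwise ..)
    (by simpa using PySem.List.sorted_pairwise ..) (by simp)
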